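-- pv_equiv track=rewrite | github.com/wael-younes/students-grade-analyzer | index.py | count_passed
-- ===== SOURCE A (Python) =====
-- def count_passed(grades,iteration:int):
--     if iteration==len(grades):
--         return 0
--     if grades[iteration]>=60:
--         count=1
--     else:
--         count=0
--     return count + count_passed(grades,iteration+1)
-- ===== SOURCE B (Python) =====
-- def count_passed(grades, iteration: int):
--     return sum(1 for i in range(iteration, len(grades)) if grades[i] >= 60)
-- ===== Notes on version B (the rewrite author's own statement) =====
-- stated objective: faster
-- what changed: Replaced A's non-tail recursion (one Python stack frame per remaining element) by a single generator expression summing 1 over the index range where grades[i] >= 60.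
import Mathlib
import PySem

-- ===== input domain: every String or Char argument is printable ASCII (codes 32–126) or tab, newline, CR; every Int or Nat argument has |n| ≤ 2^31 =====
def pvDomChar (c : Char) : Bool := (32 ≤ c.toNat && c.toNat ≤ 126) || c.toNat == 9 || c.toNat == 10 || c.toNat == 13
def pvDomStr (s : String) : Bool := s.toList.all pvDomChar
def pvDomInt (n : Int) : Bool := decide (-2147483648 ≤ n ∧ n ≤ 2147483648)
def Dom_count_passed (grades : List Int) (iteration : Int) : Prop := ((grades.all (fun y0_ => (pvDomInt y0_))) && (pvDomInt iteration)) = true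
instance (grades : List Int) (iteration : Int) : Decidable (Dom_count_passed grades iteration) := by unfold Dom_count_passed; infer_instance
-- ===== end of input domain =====

-- B replaces A's non-tail recursion by a single generator-style index-comprehension count
-- (sum of 1 over range(iteration, len(grades)) where grades[i] >= 60): no recursion, O(1) extra space.

-- ===== PORT A =====
-- A's recursion, totalised with a fuel parameter (fuel is always sufficient on Pre_;
-- the 0-fuel and IndexError (pyGet? = none) branches are only reached outside Pre_).
def count_passed_go (grades : List Int) (iteration : Int) : Nat → Int
  | 0 => 0
  | fuel + 1 =>
    if iteration = (grades.length : Int) then 0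
    else
      match PySem.List.pyGet? grades iteration with
      | none => 0      -- Python: IndexError (excluded by Pre_)
      | some g =>
        (if g ≥ 60 then (1 : Int) else 0) + count_passed_go grades (iteration + 1) fuel

def count_passed (grades : List Int) (iteration : Int) : Int :=
  count_passed_go grades iteration (2 * grades.length + 1)

-- ===== PORT B =====
-- sum(1 for i in range(iteration, len(grades)) if grades[i] >= 60):
-- filter the index range by the predicate and count the survivors.
-- (pyGetD's default 0 is only reached where Python raises IndexError, i.e. outside Pre_.)
def count_passed_alt (grades : List Int) (iteration : Int) : Int :=
  (((PySem.List.pyRange iteration (grades.length : Int) 1).filter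
      (fun i => decide (60 ≤ PySem.List.pyGetD grades i 0))).length : Int)

-- ===== PRECONDITION & SPEC =====
-- Pre_ excludes exactly the inputs where Python A raises (IndexError on grades[iteration]
-- when iteration is outside [-len(grades), len(grades)]).
def Pre_count_passed (grades : List Int) (iteration : Int) : Prop :=
  -(grades.length : Int) ≤ iteration ∧ iteration ≤ (grades.length : Int)
instance (grades : List Int) (iteration : Int) : Decidable (Pre_count_passed grades iteration) := by unfold Pre_count_passed; infer_instance

def pvWitness_count_passed : List Int × Int := ([70, 50, 60], 0)

def Spec_count_passed (grades : List Int) (iteration : Int) (out : Int) : Prop := out = count_passed_alt grades iteration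
instance (grades : List Int) (iteration : Int) (out : Int) : Decidable (Spec_count_passed grades iteration out) := by unfold Spec_count_passed; infer_instance

-- ===== CLAIM (what is proved, stated in full; the proofs are below) =====
def Claim_equal_count_passed : Prop := ∀ (grades : List Int) (iteration : Int), Dom_count_passed grades iteration → Pre_count_passed grades iteration → Spec_count_passed grades iteration (count_passed grades iteration)

-- ===== LEMMAS AND PROOFS =====
-- A's recursion (with enough fuel) computes B's filtered-range count.
theorem go_eq_filter (grades : List Int) :
    ∀ (fuel : Nat) (iteration : Int),
      -(grades.length : Int) ≤ iteration → iteration ≤ (grades.length : Int) →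
      ((grades.length : Int) - iteration).toNat ≤ fuel →
      count_passed_go grades iteration fuel =
        (((PySem.List.pyRange iteration (grades.length : Int) 1).filter
            (fun i => decide (60 ≤ PySem.List.pyGetD grades i 0))).length : Int) := by
  intro fuel
  induction fuel with
  | zero =>
    intro iteration h1 h2 hf
    have : iteration = (grades.length : Int) := by omega
    subst this
    rw [PySem.List.pyRange_one_eq_nil (le_refl _)]
    simp [count_passed_go]
  | succ n ih =>
    intro iteration h1 h2 hf
    simp only [count_passed_go]
    by_cases heq : iteration = (grades.length : Int)
    · subst heq
      rw [PySem.List.pyRange_one_eq_nil (le_refl _)]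
      simp
    · have hlt : iteration < (grades.length : Int) := by omega
      rw [if_neg heq, PySem.List.pyRange_one_cons hlt]
      cases hg : PySem.List.pyGet? grades iteration with
      | none =>
        exfalso
        have := (PySem.List.pyGet?_eq_none_iff (xs := grades) (i := iteration)).mp hg
        exact this (by constructor <;> omega)
      | some g =>
        have hd : PySem.List.pyGetD grades iteration 0 = g := by
          simp [PySem.List.pyGetD, hg]
        rw [ih (iteration + 1) (by omega) (by omega) (by omega)]
        simp only [List.filter_cons, hd]
        by_cases hge : (60 : Int) ≤ g
        · rw [if_pos (by simpa using hge), if_pos (by simpa using hge)]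
          simp [Int.add_comm]
        · rw [if_neg (by simpa using hge), if_neg (by simpa using hge)]
          simp

-- ===== VERDICT (by name: the statement is the Claim_ definition above) =====
theorem count_passed_spec : Claim_equal_count_passed := by
  intro grades iteration _ hpre
  obtain ⟨h1, h2⟩ := hpre
  unfold Spec_count_passed count_passed count_passed_alt
  exact go_eq_filter grades _ iteration h1 h2 (by omega)
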